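-- pv_equiv track=rewrite | github.com/Spxxk/MATS | hour2_single_figure.py | ack_time
-- ===== SOURCE A (Python) =====
-- ACK_KEYWORDS = [
--     "document", "the document", "states", "according to", "however", "but",
--     "incorrect", "factually", "conflict", "despite"
-- ]
--
-- def ack_time(generated_text):
--     """
--     First step where CoT acknowledges conflict, using keyword heuristic.
--     Here we approximate by finding earliest character position; later we’ll do token index.
--     Returns True/False + matched keyword + char index.
--     """
--     lower = generated_text.lower()
--     best = None
--     best_kw = None
--     for kw in ACK_KEYWORDS:
--         idx = lower.find(kw)
--         if idx != -1 and (best is None or idx < best):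
--             best = idx
--             best_kw = kw
--     return best is not None, best_kw, best
-- ===== SOURCE B (Python) =====
-- ACK_KEYWORDS = [
--     "document", "the document", "states", "according to", "however", "but",
--     "incorrect", "factually", "conflict", "despite"
-- ]
--
-- def ack_time(generated_text):
--     lower = generated_text.lower()
--     for i in range(len(lower)):
--         for kw in ACK_KEYWORDS:
--             if lower.startswith(kw, i):
--                 return True, kw, i
--     return False, None, None
-- ===== Notes on version B (the rewrite author's own statement) =====
-- stated objective: alternative
-- what changed: Replaces the per-keyword str.find plus running-minimum fold with a single left-to-right positional scan that returns on the first position (keywords tried in list order) where some keyword starts.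
import Mathlib
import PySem

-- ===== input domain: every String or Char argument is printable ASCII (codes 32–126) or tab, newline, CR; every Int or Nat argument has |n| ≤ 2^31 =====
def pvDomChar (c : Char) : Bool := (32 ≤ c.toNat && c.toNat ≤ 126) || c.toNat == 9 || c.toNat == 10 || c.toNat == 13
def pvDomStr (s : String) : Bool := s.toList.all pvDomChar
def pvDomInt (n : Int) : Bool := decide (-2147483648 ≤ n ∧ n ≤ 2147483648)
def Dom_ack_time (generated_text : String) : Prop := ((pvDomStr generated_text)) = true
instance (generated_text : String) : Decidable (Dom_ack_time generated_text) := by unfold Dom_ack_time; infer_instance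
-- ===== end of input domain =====

-- B replaces A's per-keyword find + running minimum with one left-to-right positional scan
-- that returns at the first position where some keyword starts (alternative decomposition, same cost).

-- ===== PORT A =====
def ackKeywords : List String :=
  ["document", "the document", "states", "according to", "however", "but",
   "incorrect", "factually", "conflict", "despite"]

-- one iteration of A's 'for kw in ACK_KEYWORDS' loop; state = (best, best_kw)
def ackStep (lower : String) (st : Option Int × Option String) (kw : String) :
    Option Int × Option String :=
  let idx := PySem.Str.find lower kw
  if idx != -1 && (match st.1 with | none => true | some b => decide (idx < b)) then
    (some idx, some kw)
  else st

def ack_time (generated_text : String) : Bool × Option String × Option Int :=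
  let lower := PySem.Str.lower generated_text
  let st := ackKeywords.foldl (ackStep lower) (none, none)
  (st.1.isSome, st.2, st.1)

-- ===== PORT B =====
-- inner loop of Source B: first keyword (in list order) starting at position i.
-- lower.startswith(kw, i) is ported as startswith on (l.drop i); exact since 0 ≤ i ≤ len(l).
def ackAt (l : List Char) (i : Nat) : Option String :=
  ackKeywords.find? (fun kw => PySem.Chars.startswith (l.drop i) kw.toList)

-- outer 'for i in range(len(lower))' loop with early return; fuel = number of remaining positions
def ackScan (l : List Char) (i fuel : Nat) : Bool × Option String × Option Int :=
  match fuel with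
  | 0 => (false, none, none)
  | fuel + 1 =>
    match ackAt l i with
    | some kw => (true, some kw, some (i : Int))
    | none => ackScan l (i + 1) fuel

def ack_time_alt (generated_text : String) : Bool × Option String × Option Int :=
  let l := PySem.Chars.lower generated_text.toList
  ackScan l 0 l.length

-- ===== PRECONDITION & SPEC =====
def Spec_ack_time (generated_text : String) (out : Bool × Option String × Option Int) : Prop := out = ack_time_alt generated_text
instance (generated_text : String) (out : Bool × Option String × Option Int) : Decidable (Spec_ack_time generated_text out) := by unfold Spec_ack_time; infer_instance

-- ===== CLAIM (what is proved, stated in full; the proofs are below) =====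
def Claim_equal_ack_time : Prop := ∀ (generated_text : String), Dom_ack_time generated_text → Spec_ack_time generated_text (ack_time generated_text)

-- ===== LEMMAS AND PROOFS =====

-- "some keyword matches at position i" in Prop form
theorem ackAt_eq_none_iff (l : List Char) (i : Nat) :
    ackAt l i = none ↔ ∀ kw ∈ ackKeywords, ¬ kw.toList <+: l.drop i := by
  simp [ackAt, List.find?_eq_none, PySem.Chars.startswith_iff]

theorem ackAt_isSome_of (l : List Char) (i : Nat) (kw : String)
    (hkw : kw ∈ ackKeywords) (h : kw.toList <+: l.drop i) : (ackAt l i).isSome := by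
  unfold ackAt
  rw [List.find?_isSome]
  exact ⟨kw, hkw, by simpa [PySem.Chars.startswith_iff] using h⟩

-- scan over a region with no match returns the no-match triple
theorem ackScan_none (l : List Char) :
    ∀ fuel i, (∀ j, j < fuel → ackAt l (i + j) = none) → ackScan l i fuel = (false, none, none) := by
  intro fuel
  induction fuel with
  | zero => intro i _; rfl
  | succ f ih =>
    intro i h
    have h0 : ackAt l i = none := by simpa using h 0 (Nat.succ_pos f)
    have : ackScan l (i + 1) f = (false, none, none) := by
      apply ih
      intro j hj
      have := h (j + 1) (by omega)
      rwa [show i + (j + 1) = i + 1 + j from by omega] at this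
    simp [ackScan, h0, this]

-- scan hits the first matching position
theorem ackScan_hit (l : List Char) :
    ∀ fuel i j kw, j < fuel → (∀ j', j' < j → ackAt l (i + j') = none) →
      ackAt l (i + j) = some kw → ackScan l i fuel = (true, some kw, some ((i + j : Nat) : Int)) := by
  intro fuel
  induction fuel with
  | zero => intro i j kw h; omega
  | succ f ih =>
    intro i j kw hj hmin hhit
    cases j with
    | zero =>
      simp at hhit
      simp [ackScan, hhit]
    | succ j' =>
      have h0 : ackAt l i = none := by simpa using hmin 0 (Nat.succ_pos j')
      have heq : i + 1 + j' = i + (j' + 1) := by omega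
      have : ackScan l (i + 1) f = (true, some kw, some ((i + 1 + j' : Nat) : Int)) := by
        refine ih (i + 1) j' kw (by omega) ?_ ?_
        · intro j'' hj''
          have := hmin (j'' + 1) (by omega)
          rwa [show i + (j'' + 1) = i + 1 + j'' from by omega] at this
        · rwa [show i + (j' + 1) = i + 1 + j' from by omega] at hhit
      rw [heq] at this
      simp only [ackScan, h0]
      exact this

-- the three behaviours of one iteration of A's inner step
theorem ackStep_absent (lower : String) (st : Option Int × Option String) (kw : String)
    (hk : PySem.Str.find lower kw = -1) : ackStep lower st kw = st := by
  simp only [ackStep, hk]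
  simp

-- states whose best (if any) is > m
def BigState (m : Nat) (st : Option Int × Option String) : Prop :=
  st.1 = none ∨ ∃ b, st.1 = some b ∧ (m : Int) < b

theorem ackStep_big (lower : String) (m : Nat) (st : Option Int × Option String) (kw : String)
    (hst : BigState m st) (hk : (m : Int) < PySem.Str.find lower kw) :
    BigState m (ackStep lower st kw) := by
  obtain ⟨b?, k0⟩ := st
  cases b? with
  | none =>
    simp only [ackStep]
    split
    · exact Or.inr ⟨_, rfl, hk⟩
    · exact hst
  | some b =>
    simp only [ackStep]
    split
    · exact Or.inr ⟨_, rfl, hk⟩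
    · exact hst

theorem ackStep_hit (lower : String) (m : Nat) (kw : String) (st : Option Int × Option String)
    (hst : BigState m st) (hfind : PySem.Str.find lower kw = (m : Int)) :
    ackStep lower st kw = (some (m : Int), some kw) := by
  obtain ⟨b?, k0⟩ := st
  rcases hst with h | ⟨b, hb, hlt⟩
  · simp only at h; subst h
    have hc : (((m : Int)) != -1 && true) = true := by
      simp only [Bool.and_true, bne_iff_ne, ne_eq]
      omega
    simp only [ackStep, hfind, hc, if_pos]
  · simp only at hb; subst hb
    have hc : (((m : Int)) != -1 && decide ((m : Int) < b)) = true := by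
      simp only [Bool.and_eq_true, bne_iff_ne, ne_eq, decide_eq_true_eq]
      constructor
      · omega
      · exact hlt
    simp only [ackStep, hfind, hc, if_pos]

theorem ackStep_ge (lower : String) (m : Nat) (k0 : Option String) (kw : String)
    (hk : (m : Int) ≤ PySem.Str.find lower kw) :
    ackStep lower (some (m : Int), k0) kw = (some (m : Int), k0) := by
  have hd : decide (PySem.Str.find lower kw < (m : Int)) = false := decide_eq_false (by omega)
  simp only [ackStep, hd, Bool.and_false, Bool.false_eq_true, if_false]

-- A's fold when every keyword is absent: state unchanged
theorem foldA_all_absent (lower : String) (ks : List String) (st : Option Int × Option String)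
    (h : ∀ kw ∈ ks, PySem.Str.find lower kw = -1) :
    ks.foldl (ackStep lower) st = st := by
  induction ks generalizing st with
  | nil => rfl
  | cons k tl ih =>
    rw [List.foldl_cons, ackStep_absent lower st k (h k (by simp))]
    exact ih _ (fun kw hkw => h kw (by simp [hkw]))

-- fold over keywords whose find is -1 or > m preserves BigState
theorem foldA_pre (lower : String) (m : Nat) (ks : List String) (st : Option Int × Option String)
    (hst : BigState m st)
    (h : ∀ kw ∈ ks, PySem.Str.find lower kw = -1 ∨ (m : Int) < PySem.Str.find lower kw) :
    BigState m (ks.foldl (ackStep lower) st) := by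
  induction ks generalizing st with
  | nil => exact hst
  | cons k tl ih =>
    refine ih (st := ackStep lower st k) ?_ (fun kw hkw => h kw (by simp [hkw]))
    rcases h k (by simp) with hk | hk
    · rw [ackStep_absent lower st k hk]; exact hst
    · exact ackStep_big lower m st k hst hk

-- fold over keywords whose find is -1 or ≥ m leaves a best-=-m state unchanged
theorem foldA_post (lower : String) (m : Nat) (k0 : Option String) (ks : List String)
    (h : ∀ kw ∈ ks, PySem.Str.find lower kw = -1 ∨ (m : Int) ≤ PySem.Str.find lower kw) :
    ks.foldl (ackStep lower) (some (m : Int), k0) = (some (m : Int), k0) := by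
  induction ks with
  | nil => rfl
  | cons k tl ih =>
    have hk : ackStep lower (some (m : Int), k0) k = (some (m : Int), k0) := by
      rcases h k (by simp) with hk | hk
      · exact ackStep_absent lower _ k hk
      · exact ackStep_ge lower m k0 k hk
    rw [List.foldl_cons, hk]
    exact ih (fun kw hkw => h kw (by simp [hkw]))

-- every keyword is a nonempty string
theorem ackKeywords_ne_nil : ∀ kw ∈ ackKeywords, kw.toList ≠ [] := by decide

-- ===== VERDICT (by name: the statement is the Claim_ definition above) =====
theorem ack_time_spec : Claim_equal_ack_time := by
  intro s _
  unfold Spec_ack_time ack_time ack_time_alt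
  set l : List Char := PySem.Chars.lower s.toList with hl
  have hfind : ∀ kw : String, PySem.Str.find (PySem.Str.lower s) kw = PySem.Chars.find l kw.toList := by
    intro kw; simp [hl]
  by_cases hex : ∃ j, (ackAt l j).isSome
  · -- m = first matching position, kw* = first keyword matching there
    classical
    let m := Nat.find hex
    obtain ⟨kw, hkw⟩ : ∃ kw, ackAt l m = some kw := by
      have := Nat.find_spec hex
      exact Option.isSome_iff_exists.mp this
    have hmin : ∀ j < m, ackAt l j = none := by
      intro j hj
      have := Nat.find_min hex hj
      simpa [Option.not_isSome_iff_eq_none] using this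
    have hnopre : ∀ j < m, ∀ kw' ∈ ackKeywords, ¬ kw'.toList <+: l.drop j := by
      intro j hj
      exact (ackAt_eq_none_iff l j).1 (hmin j hj)
    -- structure of find? = some kw
    obtain ⟨hpkw, pre, post, hsplit, hpre0⟩ := List.find?_eq_some_iff_append.mp hkw
    have hpre : ∀ a ∈ pre, ¬ (PySem.Chars.startswith (l.drop m) a.toList) = true := by
      intro a ha
      have := hpre0 a ha
      simp only [Bool.not_eq_eq_eq_not, Bool.not_true] at this
      simp [this]
    have hkwmem : kw ∈ ackKeywords := by rw [hsplit]; simp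
    have hkwpref : kw.toList <+: l.drop m := (PySem.Chars.startswith_iff _ _).mp hpkw
    -- find value of any keyword matching nowhere before m:
    have hge : ∀ kw' ∈ ackKeywords, PySem.Chars.find l kw'.toList = -1 ∨
        ((m : Int) ≤ PySem.Chars.find l kw'.toList ∧
         (kw'.toList <+: l.drop m → PySem.Chars.find l kw'.toList = (m : Int)) ∧
         (¬ kw'.toList <+: l.drop m → (m : Int) < PySem.Chars.find l kw'.toList)) := by
      intro kw' hmem
      by_cases habs : PySem.Chars.find l kw'.toList = -1
      · exact Or.inl habs
      · right
        have hnn : 0 ≤ PySem.Chars.find l kw'.toList := by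
          have := PySem.Chars.neg_one_le_find (s := l) (sub := kw'.toList)
          omega
        obtain ⟨hat, hfirst⟩ := PySem.Chars.find_spec (s := l) (sub := kw'.toList) hnn
        have hmle : m ≤ (PySem.Chars.find l kw'.toList).toNat := by
          by_contra hlt
          exact hnopre _ (by omega) kw' hmem hat
        have hcast : PySem.Chars.find l kw'.toList = ((PySem.Chars.find l kw'.toList).toNat : Int) := by
          omega
        refine ⟨by omega, ?_, ?_⟩
        · intro hp
          have : ¬ m < (PySem.Chars.find l kw'.toList).toNat := by
            intro hlt
            exact hfirst m hlt hp
          omega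
        · intro hnp
          have : (PySem.Chars.find l kw'.toList).toNat ≠ m := by
            intro he; rw [he] at hat; exact hnp hat
          omega
    -- A's fold
    have hA : ackKeywords.foldl (ackStep (PySem.Str.lower s)) (none, none)
        = (some (m : Int), some kw) := by
      rw [hsplit, List.foldl_append, List.foldl_cons]
      have hbig : BigState m (pre.foldl (ackStep (PySem.Str.lower s)) (none, none)) := by
        apply foldA_pre
        · exact Or.inl rfl
        · intro kw' hmem'
          have hmem : kw' ∈ ackKeywords := by rw [hsplit]; simp [hmem']
          rcases hge kw' hmem with h1 | ⟨_, _, h3⟩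
          · left; rw [hfind]; exact h1
          · right; rw [hfind]
            exact h3 (fun hp => (hpre kw' hmem') ((PySem.Chars.startswith_iff _ _).mpr hp))
      have hstep := ackStep_hit (PySem.Str.lower s) m kw _ hbig
        (by rw [hfind]
            rcases hge kw hkwmem with h1 | ⟨_, h2, _⟩
            · exact absurd h1 ((PySem.Chars.find_ne_neg_one_iff l kw.toList).mpr
                ((PySem.Chars.isIn_iff_infix kw.toList l).mp
                  ((PySem.Chars.exists_prefix_drop_iff_isIn kw.toList l).mp ⟨m, hkwpref⟩)))
            · exact h2 hkwpref)
      rw [hstep]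
      apply foldA_post
      intro kw' hmem'
      have hmem : kw' ∈ ackKeywords := by rw [hsplit]; simp [hmem']
      rcases hge kw' hmem with h1 | ⟨h2, _, _⟩
      · left; rw [hfind]; exact h1
      · right; rw [hfind]; exact h2
    -- B's scan: m < l.length since kw is nonempty and prefixes l.drop m
    have hmlt : m < l.length := by
      have hne := ackKeywords_ne_nil kw hkwmem
      by_contra hge'
      have hdrop : l.drop m = [] := List.drop_eq_nil_of_le (by omega)
      rw [hdrop] at hkwpref
      exact hne (List.prefix_nil.mp hkwpref)
    have hB : ackScan l 0 l.length = (true, some kw, some ((m : Nat) : Int)) := by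
      have := ackScan_hit l l.length 0 m kw hmlt
        (fun j' hj' => by simpa using hmin j' hj') (by simpa using hkw)
      simpa using this
    simp only [hA, hB]
    simp
  · -- no match anywhere
    push Not at hex
    have hnone : ∀ j, ackAt l j = none := by
      intro j
      have := hex j
      simpa [Option.not_isSome_iff_eq_none] using this
    have hB : ackScan l 0 l.length = (false, none, none) :=
      ackScan_none l l.length 0 (fun j _ => by simpa using hnone j)
    have hA : ackKeywords.foldl (ackStep (PySem.Str.lower s)) (none, none) = (none, none) := by
      apply foldA_all_absent
      intro kw hmem
      rw [hfind]
      apply (PySem.Chars.find_eq_neg_one_iff l kw.toList).mpr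
      intro hinf
      obtain ⟨j, hj⟩ : ∃ j, kw.toList <+: l.drop j :=
        (PySem.Chars.exists_prefix_drop_iff_isIn kw.toList l).mpr
          ((PySem.Chars.isIn_iff_infix kw.toList l).mpr hinf)
      have := ackAt_isSome_of l j kw hmem hj
      rw [hnone j] at this
      simp at this
    simp only [hA, hB]
    simp
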